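-- pv_equiv track=rewrite | github.com/arielfcotrim/DevSecOpsBIU12 | PythonProgramming/PyTwo/string_letter_manipulations.py | get_string_after_char
-- ===== SOURCE A (Python) =====
-- def get_string_after_char(string, character):
--     """
--     Returns the substring of the input string after the last occurrence of a given character.
--
--     :param string: A string.
--     :param character: A character to search for in the string.
--     :return: A string containing the substring after the last occurrence of the character.
--     """
--
--     string_after_char_msg = f"The string after the letter, '{character}', is: "
--
--     partial_string = ""
--     # Iterate over the indices of the string in reverse order
--     for index in range(len(string) - 1, -1, -1):
--         # Check if the character at the current index is the one we are looking for
--         if string[index] == character: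
--             # Stop iterating if we find the last occurrence of the character
--             break
--         # Append the current character to the partial string
--         partial_string += string[index]
--
--     # Reverse the partial string to get the correct order of characters
--     normalized_string = partial_string[::-1]
--
--     return string_after_char_msg + normalized_string
-- ===== SOURCE B (Python) =====
-- def get_string_after_char(string, character):
--     last_index = -1
--     for i, ch in enumerate(string):
--         if ch == character:
--             last_index = i
--     normalized_string = string[last_index + 1:]
--     return f"The string after the letter, '{character}', is: " + normalized_string
-- ===== Notes on version B (the rewrite author's own statement) =====
-- stated objective: faster
-- what changed: Replaced A's backward scan that accumulates characters with repeated string concatenation and then reverses, by a single forward pass tracking the last match index followed by one slice.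
import Mathlib
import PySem

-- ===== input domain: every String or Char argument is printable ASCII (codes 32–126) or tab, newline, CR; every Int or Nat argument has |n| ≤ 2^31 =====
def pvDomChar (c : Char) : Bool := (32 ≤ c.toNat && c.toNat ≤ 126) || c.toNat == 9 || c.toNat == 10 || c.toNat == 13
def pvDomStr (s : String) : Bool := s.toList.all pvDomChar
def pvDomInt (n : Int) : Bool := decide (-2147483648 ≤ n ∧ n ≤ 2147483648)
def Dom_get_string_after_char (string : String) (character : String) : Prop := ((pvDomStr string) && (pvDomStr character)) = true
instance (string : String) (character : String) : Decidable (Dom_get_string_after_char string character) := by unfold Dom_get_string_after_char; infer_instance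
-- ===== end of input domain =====

-- B replaces A's backward accumulate-then-reverse scan by one forward pass tracking the
-- last match index plus a single slice; alternative decomposition, same observable result.

-- ===== PORT A =====
-- A's reverse-index loop 'for index in range(len(string)-1,-1,-1)' visits exactly the
-- characters of string in reverse order; ported as structural recursion over
-- string.toList.reverse with the same state (partial_string), same branch order, break = stop.
def pvALoop (c : List Char) : List Char → List Char → List Char
  | [], acc => acc
  | ch :: rest, acc => if [ch] = c then acc else pvALoop c rest (acc ++ [ch])

def get_string_after_char (string : String) (character : String) : String :=
  let string_after_char_msg := "The string after the letter, '" ++ character ++ "', is: "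
  let partial_string := pvALoop character.toList string.toList.reverse []
  -- partial_string[::-1] (PySem.List.slice? _ none none (-1) = reverse)
  let normalized_string := partial_string.reverse
  string_after_char_msg ++ String.mk normalized_string

-- ===== PORT B =====
def get_string_after_char_alt (string : String) (character : String) : String :=
  let last_index : Int := (PySem.List.enumerate string.toList 0).foldl
      (fun last p => if [p.2] = character.toList then p.1 else last) (-1)
  let normalized_string := PySem.List.slice string.toList (some (last_index + 1)) none
  "The string after the letter, '" ++ character ++ "', is: " ++ String.mk normalized_string

-- ===== PRECONDITION & SPEC =====
def Spec_get_string_after_char (string : String) (character : String) (out : String) : Prop := out = get_string_after_char_alt string character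
instance (string : String) (character : String) (out : String) : Decidable (Spec_get_string_after_char string character out) := by unfold Spec_get_string_after_char; infer_instance

-- ===== CLAIM (what is proved, stated in full; the proofs are below) =====
def Claim_equal_get_string_after_char : Prop := ∀ (string : String) (character : String), Dom_get_string_after_char string character → Spec_get_string_after_char string character (get_string_after_char string character)

-- ===== LEMMAS AND PROOFS =====

-- A's loop collects the reversed-order characters up to (excluding) the first match.
theorem pvALoop_eq_takeWhile (c : List Char) (r acc : List Char) :
    pvALoop c r acc = acc ++ r.takeWhile (fun ch => !decide ([ch] = c)) := by
  induction r generalizing acc with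
  | nil => simp [pvALoop]
  | cons ch rest ih =>
    by_cases h : [ch] = c <;> simp [pvALoop, h, ih]

-- B's fold over enumerate, unfolded on a snoc.
theorem pvFold_append (c : List Char) (l : List Char) (x : Char) (s a : Int) :
    (PySem.List.enumerate (l ++ [x]) s).foldl
        (fun last p => if [p.2] = c then p.1 else last) a
      = if [x] = c then s + l.length
        else (PySem.List.enumerate l s).foldl
          (fun last p => if [p.2] = c then p.1 else last) a := by
  rw [PySem.List.enumerate_append]
  simp [PySem.List.enumerate_cons, PySem.List.enumerate_nil]

-- The fold's result stays in [-1, length - 1] (shifted: result + 1 ≤ length, -1 ≤ result).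
theorem pvFold_bounds (c : List Char) (l : List Char) :
    -1 ≤ (PySem.List.enumerate l 0).foldl
        (fun last p => if [p.2] = c then p.1 else last) (-1)
    ∧ (PySem.List.enumerate l 0).foldl
        (fun last p => if [p.2] = c then p.1 else last) (-1) + 1 ≤ (l.length : Int) := by
  induction l using List.reverseRecOn with
  | nil => simp [PySem.List.enumerate_nil]
  | append_singleton l x ih =>
    rw [pvFold_append]
    obtain ⟨h1, h2⟩ := ih
    split_ifs with h <;>
      · simp only [List.length_append, List.length_cons, List.length_nil] at *
        push_cast at *
        omega

-- Main list-level equivalence: the reversed prefix-before-last-match equals the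
-- drop-after-last-match slice.
theorem pvMain (c : List Char) (l : List Char) :
    (l.reverse.takeWhile (fun ch => !decide ([ch] = c))).reverse
      = PySem.List.slice l
          (some ((PySem.List.enumerate l 0).foldl
            (fun last p => if [p.2] = c then p.1 else last) (-1) + 1)) none := by
  induction l using List.reverseRecOn with
  | nil => simp [PySem.List.enumerate_nil, PySem.List.slice]
  | append_singleton l x ih =>
    rw [pvFold_append]
    by_cases h : [x] = c
    · rw [if_pos h, PySem.List.slice_from _ (by omega)]
      have hlen : ((0 : Int) + (l.length : Int) + 1).toNat = l.length + 1 := by omega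
      rw [hlen, List.drop_eq_nil_of_le (by simp)]
      have hx : (!decide ([x] = c)) = false := by simp [h]
      simp [List.takeWhile_cons, hx]
    · have hb := pvFold_bounds c l
      set F := (PySem.List.enumerate l 0).foldl
        (fun last p => if [p.2] = c then p.1 else last) (-1) with hF
      have h0 : (0 : Int) ≤ F + 1 := by omega
      have hle : (F + 1).toNat ≤ l.length := by omega
      rw [if_neg h]
      rw [PySem.List.slice_from _ h0] at ih ⊢
      simp only [List.reverse_append, List.reverse_cons, List.reverse_nil,
        List.nil_append, List.singleton_append, List.takeWhile_cons, h, decide_false,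
        Bool.not_false, if_true]
      rw [List.drop_append_of_le_length hle]
      simp [ih]

-- ===== VERDICT (by name: the statement is the Claim_ definition above) =====
theorem get_string_after_char_spec : Claim_equal_get_string_after_char := by
  intro string character _
  show _ = _
  simp only [get_string_after_char, get_string_after_char_alt]
  rw [pvALoop_eq_takeWhile, List.nil_append, pvMain]
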